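-- pv_equiv track=rewrite | github.com/Wojtekpob/Autonomous-Driving-System | path_planning.py | select_lane_lines
-- ===== SOURCE A (Python) =====
-- def select_lane_lines(lane_lines):
--     """
--     Selects up to two most relevant lane lines based on length and extension.
--
--     :param lane_lines: List of lane lines with their properties.
--     :return: List of selected lane lines.
--     """
--     min_length = 50
--     valid_lane_lines = [line for line in lane_lines if line['length'] >= min_length]
--
--     if not valid_lane_lines:
--         lane_lines.sort(key=lambda x: -x['max_y'])
--         selected_lane_lines = [lane_lines[0]] if lane_lines else None
--     else:
--         valid_lane_lines.sort(key=lambda x: (x['length'], -x['max_y']), reverse=True)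
--         selected_lane_lines = valid_lane_lines[:2]
--
--     return selected_lane_lines
-- ===== SOURCE B (Python) =====
-- def select_lane_lines(lane_lines):
--     """
--     Selects up to two most relevant lane lines based on length and extension.
--     Single-pass top-2 selection instead of sort-and-slice (no sort at all).
--     Note: unlike the original, this does not sort lane_lines in place in the
--     no-valid-line branch; the return value is identical.
--     """
--     min_length = 50
--     best = []  # up to two best valid lines, best first
--     for line in lane_lines:
--         if line['length'] >= min_length:
--             k = (line['length'], -line['max_y'])
--             if not best:
--                 best = [line]
--             elif k > (best[0]['length'], -best[0]['max_y']):
--                 best = [line, best[0]]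
--             elif len(best) == 1:
--                 best = [best[0], line]
--             elif k > (best[1]['length'], -best[1]['max_y']):
--                 best = [best[0], line]
--     if best:
--         return best
--     if not lane_lines:
--         return None
--     top = lane_lines[0]
--     for line in lane_lines[1:]:
--         if line['max_y'] > top['max_y']:
--             top = line
--     return [top]
-- ===== Notes on version B (the rewrite author's own statement) =====
-- stated objective: alternative
-- what changed: Replaced the sort-and-slice (sort valid lines by (length,-max_y) descending, take first two; or sort all by -max_y and take the head) with a single streaming pass that maintains the top-2 valid lines, and a linear max scan in the no-valid-line branch; B does not mutate lane_lines in place in that branch (return value identical).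
import Mathlib
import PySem

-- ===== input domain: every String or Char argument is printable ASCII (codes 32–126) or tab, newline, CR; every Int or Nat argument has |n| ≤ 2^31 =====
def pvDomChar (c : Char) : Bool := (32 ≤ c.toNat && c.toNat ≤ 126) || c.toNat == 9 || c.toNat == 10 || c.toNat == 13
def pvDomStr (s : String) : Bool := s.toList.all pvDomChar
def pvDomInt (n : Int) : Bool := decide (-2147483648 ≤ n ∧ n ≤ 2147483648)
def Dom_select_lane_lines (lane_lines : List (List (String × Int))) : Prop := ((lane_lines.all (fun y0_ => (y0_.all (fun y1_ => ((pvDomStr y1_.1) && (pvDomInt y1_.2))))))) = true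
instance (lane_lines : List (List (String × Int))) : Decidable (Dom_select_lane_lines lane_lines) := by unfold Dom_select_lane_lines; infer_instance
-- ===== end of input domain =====

-- B replaces A's sort-and-slice by a single-pass top-2 scan (and a single-pass max in the
-- no-valid-line branch); return values agree, but B does not reproduce A's in-place sort of
-- the argument in that branch (the equivalence proved is about the return value only).

-- ===== PORT A =====
-- line['k'] for a dict ported as an association list (first-match lookup); the default 0 is
-- never reached under Pre_ (missing key = KeyError, excluded by Pre_).
def pvVal (line : List (String × Int)) (k : String) : Int :=
  PySem.Dict.getD (PySem.Dict.mk line) k 0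

def select_lane_lines (lane_lines : List (List (String × Int))) : Option (List (List (String × Int))) :=
  let min_length : Int := 50
  let valid_lane_lines := lane_lines.filter (fun line => decide (pvVal line "length" ≥ min_length))
  if valid_lane_lines.isEmpty then
    -- lane_lines.sort(key=lambda x: -x['max_y']);  [lane_lines[0]] if lane_lines else None
    match PySem.List.sorted lane_lines (fun x => -(pvVal x "max_y")) false with
    | [] => none
    | h :: _ => some [h]
  else
    -- valid.sort(key=lambda x: (x['length'], -x['max_y']), reverse=True);  valid[:2]
    some ((PySem.List.sorted2 valid_lane_lines
            (fun x => pvVal x "length") (fun x => -(pvVal x "max_y")) true).take 2)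

-- ===== PORT B =====
-- Python tuple comparison  a > b  on pairs of ints (lexicographic)
def pvTupGt (a b : Int × Int) : Bool := decide (b.1 < a.1) || (decide (a.1 = b.1) && decide (b.2 < a.2))

def pvKey (line : List (String × Int)) : Int × Int := (pvVal line "length", -(pvVal line "max_y"))

-- one step of the top-2 scan (the body of B's loop, after the length test)
def pvTop2 (best : List (List (String × Int))) (line : List (String × Int)) : List (List (String × Int)) :=
  match best with
  | [] => [line]
  | b0 :: rest =>
    if pvTupGt (pvKey line) (pvKey b0) then [line, b0]
    else match rest with
      | [] => [b0, line]
      | b1 :: _ => if pvTupGt (pvKey line) (pvKey b1) then [b0, line] else best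

def pvStep (best : List (List (String × Int))) (line : List (String × Int)) : List (List (String × Int)) :=
  if decide (pvVal line "length" ≥ 50) = true then pvTop2 best line else best

def select_lane_lines_alt (lane_lines : List (List (String × Int))) : Option (List (List (String × Int))) :=
  let best := lane_lines.foldl pvStep []
  if best.isEmpty then
    match lane_lines with
    | [] => none
    | h :: t =>
      some [t.foldl (fun top line => if decide (pvVal line "max_y" > pvVal top "max_y") = true then line else top) h]
  else
    some best

-- ===== PRECONDITION & SPEC =====
def pvHasKey (line : List (String × Int)) (k : String) : Bool := line.any (fun p => p.1 == k)

-- Pre_ excludes exactly the inputs where the Python A raises KeyError: a line without a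
-- 'length' key, or a line whose 'max_y' the taken branch's sort key would read ('max_y' of
-- every valid line, resp. of every line when no line is valid) while the key is missing.
def Pre_select_lane_lines (lane_lines : List (List (String × Int))) : Prop :=
  (∀ line ∈ lane_lines, pvHasKey line "length" = true) ∧
  (∀ line ∈ lane_lines, pvVal line "length" ≥ 50 → pvHasKey line "max_y" = true) ∧
  ((∀ line ∈ lane_lines, pvVal line "length" < 50) → ∀ line ∈ lane_lines, pvHasKey line "max_y" = true)
instance (lane_lines : List (List (String × Int))) : Decidable (Pre_select_lane_lines lane_lines) := by
  unfold Pre_select_lane_lines; infer_instance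

def pvWitness_select_lane_lines : (List (List (String × Int))) :=
  [[("length", 60), ("max_y", 10)], [("length", 40), ("max_y", 7)]]

def Spec_select_lane_lines (lane_lines : List (List (String × Int))) (out : Option (List (List (String × Int)))) : Prop := out = select_lane_lines_alt lane_lines
instance (lane_lines : List (List (String × Int))) (out : Option (List (List (String × Int)))) : Decidable (Spec_select_lane_lines lane_lines out) := by unfold Spec_select_lane_lines; infer_instance

-- ===== CLAIM (what is proved, stated in full; the proofs are below) =====
def Claim_equal_select_lane_lines : Prop := ∀ (lane_lines : List (List (String × Int))), Dom_select_lane_lines lane_lines → Pre_select_lane_lines lane_lines → Spec_select_lane_lines lane_lines (select_lane_lines lane_lines)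

-- ===== LEMMAS AND PROOFS =====

def pvStep2 {α : Type} (bef : α → α → Bool) (s : List α) (x : α) : List α :=
  match s with
  | [] => [x]
  | [y] => if bef x y then [x, y] else [y, x]
  | y :: z :: _ => if bef x y then [x, y] else if bef x z then [y, x] else [y, z]

theorem take2_insertBy {α : Type} (bef : α → α → Bool) (x : α) (l : List α) :
    (PySem.List.insertBy bef x l).take 2 = pvStep2 bef (l.take 2) x := by
  match l with
  | [] => rfl
  | [y] => simp [PySem.List.insertBy, pvStep2]; split_ifs <;> rfl
  | y :: z :: rest =>
    simp only [PySem.List.insertBy, pvStep2]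
    split_ifs <;> simp_all

theorem take2_foldl {α : Type} (bef : α → α → Bool) (xs : List α) :
    (List.foldl (fun acc x => PySem.List.insertBy bef x acc) [] xs).take 2
      = List.foldl (pvStep2 bef) [] xs := by
  have := List.foldl_hom (f := fun l : List α => l.take 2)
    (g₁ := fun acc x => PySem.List.insertBy bef x acc)
    (g₂ := pvStep2 bef) (l := xs) (init := [])
    (by intro l x; exact (take2_insertBy bef x l).symm)
  simpa using this.symm

def pvStepH {α : Type} (bef : α → α → Bool) (o : Option α) (x : α) : Option α :=
  match o with | none => some x | some y => some (if bef x y then x else y)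

theorem headq_insertBy {α : Type} (bef : α → α → Bool) (x : α) (l : List α) :
    (PySem.List.insertBy bef x l).head? = pvStepH bef l.head? x := by
  match l with
  | [] => rfl
  | y :: ys => simp [PySem.List.insertBy, pvStepH]; split_ifs <;> rfl

theorem headq_foldl {α : Type} (bef : α → α → Bool) (xs : List α) :
    (List.foldl (fun acc x => PySem.List.insertBy bef x acc) [] xs).head?
      = List.foldl (pvStepH bef) none xs := by
  have := List.foldl_hom (f := fun l : List α => l.head?)
    (g₁ := fun acc x => PySem.List.insertBy bef x acc)
    (g₂ := pvStepH bef) (l := xs) (init := [])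
    (by intro l x; exact (headq_insertBy bef x l).symm)
  simpa using this.symm

theorem headq_foldl_some {α : Type} (bef : α → α → Bool) (h : α) (t : List α) :
    List.foldl (pvStepH bef) (some h) t = some (t.foldl (fun a x => if bef x a then x else a) h) := by
  have := List.foldl_hom (f := fun a : α => some a)
    (g₁ := fun a x => if bef x a then x else a)
    (g₂ := pvStepH bef) (l := t) (init := h)
    (by intro a x; rfl)
  simpa using this

def pvBef (a b : List (String × Int)) : Bool := pvTupGt (pvKey a) (pvKey b)

theorem pvTop2_eq (s : List (List (String × Int))) (x : List (String × Int)) (hs : s.length ≤ 2) :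
    pvTop2 s x = pvStep2 pvBef s x := by
  match s with
  | [] => rfl
  | [y] => rfl
  | [y, z] => rfl
  | y :: z :: w :: r => simp at hs

theorem pvStep2_len {α : Type} (bef : α → α → Bool) (s : List α) (x : α) :
    (pvStep2 bef s x).length ≤ 2 := by
  match s with
  | [] => simp [pvStep2]
  | [y] => simp [pvStep2]; split_ifs <;> simp
  | y :: z :: r => simp [pvStep2]; split_ifs <;> simp

theorem foldl_pvTop2_eq (xs : List (List (String × Int))) (s : List (List (String × Int)))
    (hs : s.length ≤ 2) :
    List.foldl pvTop2 s xs = List.foldl (pvStep2 pvBef) s xs := by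
  induction xs generalizing s with
  | nil => rfl
  | cons x t ih =>
    simp only [List.foldl_cons, pvTop2_eq s x hs]
    exact ih _ (pvStep2_len pvBef s x)

-- sorted2's reverse=True "before" function is exactly pvBef (Python tuple '>')
theorem bef_eq :
    (fun a b : List (String × Int) =>
      decide (pvVal b "length" < pvVal a "length") ||
        (!decide (pvVal a "length" < pvVal b "length") &&
          decide (-(pvVal b "max_y") < -(pvVal a "max_y")))) = pvBef := by
  funext a b
  simp only [pvBef, pvTupGt, pvKey]
  rcases lt_trichotomy (pvVal a "length") (pvVal b "length") with h | h | h <;>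
    simp [h, ne_of_lt, ne_of_gt, lt_asymm]

theorem valid_take2 (valid : List (List (String × Int))) :
    (PySem.List.sorted2 valid (fun x => pvVal x "length") (fun x => -(pvVal x "max_y")) true).take 2
      = List.foldl pvTop2 [] valid := by
  rw [foldl_pvTop2_eq valid [] (by simp), ← take2_foldl pvBef valid, ← bef_eq]
  rfl

def pvBefM (a b : List (String × Int)) : Bool := decide (-(pvVal a "max_y") < -(pvVal b "max_y"))

theorem max_head (h : List (String × Int)) (t : List (List (String × Int))) :
    (PySem.List.sorted (h :: t) (fun x => -(pvVal x "max_y")) false).head?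
      = some (t.foldl (fun top line =>
          if decide (pvVal line "max_y" > pvVal top "max_y") = true then line else top) h) := by
  rw [PySem.List.sorted_eq_foldl_insertBy]
  rw [show (fun acc x => PySem.List.insertBy (fun a b : List (String × Int) =>
        decide ((fun x => -(pvVal x "max_y")) a < (fun x => -(pvVal x "max_y")) b)) x acc)
      = (fun acc x => PySem.List.insertBy pvBefM x acc) from rfl]
  rw [headq_foldl pvBefM (h :: t)]
  simp only [List.foldl_cons, pvStepH]
  rw [headq_foldl_some]
  rw [show (fun (a x : List (String × Int)) => if pvBefM x a then x else a)
      = (fun top line => if decide (pvVal line "max_y" > pvVal top "max_y") = true then line else top) from by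
    funext a x; simp [pvBefM]]
theorem pv_main (lane_lines : List (List (String × Int))) :
    select_lane_lines lane_lines = select_lane_lines_alt lane_lines := by
  unfold select_lane_lines select_lane_lines_alt
  simp only []
  have hstep : pvStep = fun (x : List (List (String × Int))) y =>
      if (fun line => decide (pvVal line "length" ≥ (50:Int))) y = true then pvTop2 x y else x := by
    funext a b; simp [pvStep]
  have hbest : lane_lines.foldl pvStep []
      = (lane_lines.filter (fun line => decide (pvVal line "length" ≥ (50:Int)))).foldl pvTop2 [] := by
    rw [List.foldl_filter, hstep]
  set valid := lane_lines.filter (fun line => decide (pvVal line "length" ≥ (50:Int))) with hv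
  by_cases hve : valid = []
  · -- no valid lane line
    have hb : lane_lines.foldl pvStep [] = [] := by rw [hbest, hve]; rfl
    rw [hb, hve]
    simp only [List.isEmpty_nil]
    match lane_lines with
    | [] => rfl
    | h :: t =>
      have hs := max_head h t
      match hsv : PySem.List.sorted (h :: t) (fun x => -(pvVal x "max_y")) false with
      | [] => exact absurd ((PySem.List.sorted_eq_nil_iff _ _ _).1 hsv) (by simp)
      | m :: rest =>
        rw [hsv] at hs
        simp only [List.head?_cons, Option.some.injEq] at hs
        rw [hs]
        simp
  · have hne : ¬ valid.isEmpty = true := by simp [hve]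
    have hbne : ¬ (lane_lines.foldl pvStep []).isEmpty = true := by
      rw [hbest, ← valid_take2]
      have hp : (PySem.List.sorted2 valid (fun x => pvVal x "length")
          (fun x => -(pvVal x "max_y")) true).Perm valid := PySem.List.sorted2_perm _ _ _ _
      have : PySem.List.sorted2 valid (fun x => pvVal x "length")
          (fun x => -(pvVal x "max_y")) true ≠ [] := by
        intro hnil; exact hve (List.Perm.eq_nil (hnil ▸ hp.symm))
      simp [List.isEmpty_iff, List.take_eq_nil_iff, this]
    rw [if_neg hne, if_neg hbne, hbest, ← valid_take2]

-- ===== VERDICT (by name: the statement is the Claim_ definition above) =====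
theorem select_lane_lines_spec : Claim_equal_select_lane_lines := by
  intro ll _ _
  unfold Spec_select_lane_lines
  exact pv_main ll
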